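-- pv_equiv track=rewrite | github.com/diegorodriguezv/aoc | 2022/15b.py | nibbles
-- ===== SOURCE A (Python) =====
-- def nibbles(num):
--     snum = bin(num)[2:]
--     parts = []
--     end = len(snum)
--     while end > 0:
--         parts.append(snum[max(end - 4, 0) : end].zfill(4))
--         end = end - 4
--     return "_".join(reversed(parts))
-- ===== SOURCE B (Python) =====
-- def nibbles(num):
--     s = bin(num)[2:]
--     s = "0" * (-len(s) % 4) + s
--     parts = []
--     while s:
--         parts.append(s[:4])
--         s = s[4:]
--     return "_".join(parts)
-- ===== Notes on version B (the rewrite author's own statement) =====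
-- stated objective: simpler
-- what changed: Instead of stepping backwards through the bit string in nibble strides with a per-chunk zfill and reversing the collected parts, B pads the string once at the front to a whole number of nibbles and chunks it forward, so no per-chunk padding and no reversal are needed.
import Mathlib
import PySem

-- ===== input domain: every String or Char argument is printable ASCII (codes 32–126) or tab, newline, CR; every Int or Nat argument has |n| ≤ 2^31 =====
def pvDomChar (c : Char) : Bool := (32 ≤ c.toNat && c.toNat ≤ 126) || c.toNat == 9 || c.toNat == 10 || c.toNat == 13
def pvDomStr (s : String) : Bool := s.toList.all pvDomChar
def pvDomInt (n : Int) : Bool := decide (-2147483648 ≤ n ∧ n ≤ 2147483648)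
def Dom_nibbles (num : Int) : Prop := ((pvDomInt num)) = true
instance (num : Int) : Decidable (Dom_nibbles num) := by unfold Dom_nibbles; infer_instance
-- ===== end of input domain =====

-- B replaces A's backward stride-4 loop with per-chunk zfill and a final reversal by one
-- global front pad to a multiple of 4 followed by forward chunking; same return value.

-- ===== PORT A =====
-- binary digit string of a Nat as Python's bin produces it (hand port, exact:
-- most-significant digit first, no leading zeros; empty for 0, handled in pvBin2)
def pvBinNat : Nat → List Char
  | 0 => []
  | (n+1) => pvBinNat ((n+1) / 2) ++ [if (n+1) % 2 = 1 then '1' else '0']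
decreasing_by exact Nat.div_lt_self (Nat.succ_pos n) (by omega)

-- bin(num)[2:] : for num ≥ 0 drops "0b"; for num < 0 bin gives "-0b…", so [2:] keeps a 'b'
def pvBin2 (num : Int) : List Char :=
  if 0 ≤ num then (if num = 0 then ['0'] else pvBinNat num.toNat)
  else 'b' :: pvBinNat (-num).toNat

-- str.zfill(4)
def zfill4 (l : List Char) : List Char := List.replicate (4 - l.length) '0' ++ l

-- A's while loop: parts accumulated in order of appending (back-to-front chunks)
def aLoop (s : List Char) (e : Nat) (parts : List (List Char)) : List (List Char) :=
  if e = 0 then parts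
  else aLoop s (e - 4) (parts ++ [zfill4 ((s.take e).drop (e - 4))])
decreasing_by omega

def nibbles (num : Int) : String :=
  let snum := pvBin2 num
  String.ofList (List.intercalate ['_'] (aLoop snum snum.length []).reverse)

-- ===== PORT B =====
-- B's while loop: take the first 4 chars, continue on the rest
def bChunks (s : List Char) : List (List Char) :=
  if s = [] then [] else s.take 4 :: bChunks (s.drop 4)
termination_by s.length
decreasing_by
  rename_i h
  have h1 : 0 < s.length := List.length_pos_iff_ne_nil.mpr h
  have h2 : (s.drop 4).length = s.length - 4 := List.length_drop
  omega

def nibbles_alt (num : Int) : String :=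
  let s := pvBin2 num
  let s := List.replicate ((PySem.Int.mod (-(s.length : Int)) 4).toNat) '0' ++ s
  String.ofList (List.intercalate ['_'] (bChunks s))

-- ===== PRECONDITION & SPEC =====
def Spec_nibbles (num : Int) (out : String) : Prop := out = nibbles_alt num
instance (num : Int) (out : String) : Decidable (Spec_nibbles num out) := by unfold Spec_nibbles; infer_instance

-- ===== CLAIM (what is proved, stated in full; the proofs are below) =====
def Claim_equal_nibbles : Prop := ∀ (num : Int), Dom_nibbles num → Spec_nibbles num (nibbles num)

-- ===== LEMMAS AND PROOFS =====

-- A's parts list in reversed (front-to-back) order, accumulator removed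
def aRec (s : List Char) (e : Nat) : List (List Char) :=
  if e = 0 then [] else aRec s (e - 4) ++ [zfill4 ((s.take e).drop (e - 4))]
decreasing_by omega

-- Python's pad -len(s) % 4, as a Nat
def padN (L : Nat) : Nat := (PySem.Int.mod (-(L : Int)) 4).toNat

lemma padN_eq (L : Nat) : padN L = (4 - L % 4) % 4 := by
  unfold padN
  rw [PySem.Int.mod_eq_emod_of_pos (by omega : (0:Int) < 4)]
  omega

lemma aLoop_eq (s : List Char) (e : Nat) (p : List (List Char)) :
    aLoop s e p = p ++ (aRec s e).reverse := by
  induction e using Nat.strong_induction_on generalizing p with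
  | _ e ih =>
    rw [aLoop, aRec]
    by_cases he : e = 0
    · simp [he]
    · rw [if_neg he, if_neg he, ih (e - 4) (by omega)]
      simp

lemma aRec_take (s : List Char) (k e : Nat) (hek : e ≤ k) :
    aRec (s.take k) e = aRec s e := by
  induction e using Nat.strong_induction_on generalizing k with
  | _ e ih =>
    conv_lhs => rw [aRec]
    conv_rhs => rw [aRec]
    by_cases he : e = 0
    · simp [he]
    · rw [if_neg he, if_neg he, ih (e - 4) (by omega) k (by omega),
        List.take_take, min_eq_left hek]

lemma bChunks_append (l t : List Char) (hl : 4 ∣ l.length) (ht : t.length = 4) :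
    bChunks (l ++ t) = bChunks l ++ [t] := by
  suffices H : ∀ (n : Nat) (l : List Char), l.length ≤ n → 4 ∣ l.length →
      bChunks (l ++ t) = bChunks l ++ [t] from H l.length l le_rfl hl
  intro n
  induction n with
  | zero =>
    intro l hn _
    have h0 : l = [] := by
      cases l with
      | nil => rfl
      | cons a l => simp at hn
    subst h0
    rw [List.nil_append, bChunks.eq_def, if_neg (by simp [← List.length_pos_iff_ne_nil]; omega)]
    rw [List.take_of_length_le (by omega), List.drop_eq_nil_of_le (by omega)]
    simp [bChunks]
  | succ n ih =>
    intro l hn hl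
    by_cases h0 : l = []
    · subst h0
      rw [List.nil_append, bChunks.eq_def, if_neg (by simp [← List.length_pos_iff_ne_nil]; omega)]
      rw [List.take_of_length_le (by omega), List.drop_eq_nil_of_le (by omega)]
      simp [bChunks]
    · have h4 : 4 ≤ l.length := by
        have : 0 < l.length := List.length_pos_iff_ne_nil.mpr h0
        rcases hl with ⟨c, hc⟩
        omega
      conv_lhs => rw [bChunks.eq_def]
      rw [if_neg (by simp [h0]),
          List.take_append_of_le_length h4, List.drop_append_of_le_length h4,
          ih (l.drop 4) (by simp; omega) (by simp; omega)]
      conv_rhs => rw [bChunks.eq_def]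
      rw [if_neg h0]
      simp

lemma main_parts (s : List Char) (h : s ≠ []) :
    aRec s s.length = bChunks (List.replicate (padN s.length) '0' ++ s) := by
  suffices H : ∀ (n : Nat) (s : List Char), s.length ≤ n → s ≠ [] →
      aRec s s.length = bChunks (List.replicate (padN s.length) '0' ++ s) from
    H s.length s le_rfl h
  intro n
  induction n with
  | zero =>
    intro s hn h
    exact absurd (List.eq_nil_of_length_eq_zero (by omega)) h
  | succ n ih =>
    intro s hn h
    have hpos : 0 < s.length := List.length_pos_iff_ne_nil.mpr h
    by_cases hle : s.length ≤ 4
    · -- exactly one chunk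
      have hpadlt : padN s.length = 4 - s.length := by rw [padN_eq]; omega
      conv_lhs => rw [aRec]
      rw [if_neg (by omega)]
      conv_lhs => rw [aRec]
      rw [if_pos (by omega)]
      have hlen : (List.replicate (padN s.length) '0' ++ s).length = 4 := by
        simp [hpadlt]; omega
      rw [bChunks.eq_def]
      rw [if_neg (by intro he; rw [he] at hlen; simp at hlen)]
      rw [List.take_of_length_le (le_of_eq hlen), List.drop_eq_nil_of_le (le_of_eq hlen)]
      have hnil : bChunks ([] : List Char) = [] := by rw [bChunks.eq_def]; simp
      rw [hnil]
      have h0 : s.length - 4 = 0 := by omega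
      rw [h0, List.drop_zero, List.take_length]
      unfold zfill4
      rw [hpadlt]
      simp
    · -- final 4-chunk peeled off, rest by IH on the take
      have h4 : 4 < s.length := by omega
      have hs' : (s.take (s.length - 4)).length = s.length - 4 := by simp
      have htk : s.take (s.length - 4) ≠ [] := by
        simp [← List.length_pos_iff_ne_nil]; omega
      conv_lhs => rw [aRec]
      rw [if_neg (by omega)]
      have hrec : aRec s (s.length - 4)
          = aRec (s.take (s.length - 4)) ((s.take (s.length - 4)).length) := by
        rw [hs']; exact (aRec_take s (s.length - 4) (s.length - 4) le_rfl).symm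
      rw [hrec, ih (s.take (s.length - 4)) (by rw [hs']; omega) htk, hs']
      have hpad : padN (s.length - 4) = padN s.length := by
        rw [padN_eq, padN_eq]; omega
      have hchunk : zfill4 ((s.take s.length).drop (s.length - 4)) = s.drop (s.length - 4) := by
        rw [List.take_length]
        unfold zfill4
        have hd : (s.drop (s.length - 4)).length = 4 := by simp; omega
        rw [hd]
        simp
      rw [hchunk, hpad]
      have hdvd : 4 ∣ (List.replicate (padN s.length) '0' ++ s.take (s.length - 4)).length := by
        rw [List.length_append, List.length_replicate, hs', padN_eq]
        omega
      have hd4 : (s.drop (s.length - 4)).length = 4 := by simp; omega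
      have hA := bChunks_append (List.replicate (padN s.length) '0' ++ s.take (s.length - 4))
        (s.drop (s.length - 4)) hdvd hd4
      have hsplit : List.replicate (padN s.length) '0' ++ s
          = (List.replicate (padN s.length) '0' ++ s.take (s.length - 4)) ++ s.drop (s.length - 4) := by
        rw [List.append_assoc, List.take_append_drop]
      rw [hsplit, hA]

lemma pvBin2_ne_nil (num : Int) : pvBin2 num ≠ [] := by
  unfold pvBin2
  by_cases h : (0:Int) ≤ num
  · rw [if_pos h]
    by_cases h0 : num = 0
    · simp [h0]
    · rw [if_neg h0]
      have hn : num.toNat ≠ 0 := by omega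
      rcases Nat.exists_eq_succ_of_ne_zero hn with ⟨m, hm⟩
      rw [hm, pvBinNat]; simp
  · simp [h]

-- ===== VERDICT (by name: the statement is the Claim_ definition above) =====
theorem nibbles_spec : Claim_equal_nibbles := by
  intro num _
  show nibbles num = nibbles_alt num
  simp only [nibbles, nibbles_alt]
  rw [aLoop_eq, List.nil_append]
  have := main_parts (pvBin2 num) (pvBin2_ne_nil num)
  rw [padN] at this
  rw [this, List.reverse_reverse]
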